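-- pv_equiv track=rewrite | github.com/olzhas2357/my_own_codes | project_class/project_4.py | find_anton
-- ===== SOURCE A (Python) =====
-- def find_anton(c):
--     m = "anton"
--     l = ""
--     anton = ""
--     for i in range(len(m)):
--         for j in range(len(c)):
--             if m[i] == c[j]:
--                 l += c[j]
--     for j in range(len(l)):
--         if l[j] not in anton:
--             anton += l[j]
--     return anton + "n"
-- ===== SOURCE B (Python) =====
-- def find_anton(c):
--     return "".join(letter for letter in "anto" if letter in c) + "n"
-- ===== Notes on version B (the rewrite author's own statement) =====
-- stated objective: simpler
-- what changed: Instead of collecting every occurrence of each target letter into an intermediate string and deduplicating it with a second quadratic loop, B makes one membership test per distinct target letter and joins the letters found, appending the final fixed letter.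
import Mathlib
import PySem

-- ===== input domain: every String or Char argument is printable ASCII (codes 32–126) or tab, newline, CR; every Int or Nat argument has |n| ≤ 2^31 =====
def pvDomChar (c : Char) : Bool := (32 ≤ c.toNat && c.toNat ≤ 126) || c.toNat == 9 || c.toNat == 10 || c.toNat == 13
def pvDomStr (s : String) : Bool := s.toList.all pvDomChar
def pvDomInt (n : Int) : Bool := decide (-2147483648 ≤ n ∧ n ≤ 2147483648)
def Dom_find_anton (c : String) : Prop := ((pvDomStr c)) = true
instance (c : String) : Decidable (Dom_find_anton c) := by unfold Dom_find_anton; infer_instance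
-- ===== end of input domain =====

-- B replaces A's collect-all-occurrences pass plus quadratic dedup loop with a single
-- presence test for each of the four distinct target letters, then appends "n" (simpler).

-- ===== PORT A =====
-- Literal port of A: the two index loops over range(len(m)) / range(len(c)) collecting
-- matching occurrences into l, then the dedup loop over range(len(l)); strings as List Char.
def find_anton (c : String) : String :=
  let m : List Char := "anton".toList
  let cs : List Char := c.toList
  let l : List Char :=
    (PySem.List.pyRange 0 (m.length : Int) 1).foldl (fun l i =>
      (PySem.List.pyRange 0 (cs.length : Int) 1).foldl (fun l j =>
        if PySem.List.pyGetD m i ' ' == PySem.List.pyGetD cs j ' ' then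
          l ++ [PySem.List.pyGetD cs j ' ']
        else l) l) []
  let anton : List Char :=
    (PySem.List.pyRange 0 (l.length : Int) 1).foldl (fun anton j =>
      if PySem.List.pyGetD l j ' ' ∈ anton then anton
      else anton ++ [PySem.List.pyGetD l j ' ']) []
  String.mk (anton ++ ['n'])

-- ===== PORT B =====
-- Literal port of B: filter the four target letters by membership in c, then append "n".
def find_anton_alt (c : String) : String :=
  String.mk ((['a', 'n', 't', 'o'].filter (fun letter => c.toList.contains letter)) ++ ['n'])

-- ===== PRECONDITION & SPEC =====
def Spec_find_anton (c : String) (out : String) : Prop := out = find_anton_alt c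
instance (c : String) (out : String) : Decidable (Spec_find_anton c out) := by unfold Spec_find_anton; infer_instance

-- ===== CLAIM (what is proved, stated in full; the proofs are below) =====
def Claim_equal_find_anton : Prop := ∀ (c : String), Dom_find_anton c → Spec_find_anton c (find_anton c)

-- ===== LEMMAS AND PROOFS =====

-- the dedup step of A's second loop
def ddStep (acc : List Char) (x : Char) : List Char :=
  if x ∈ acc then acc else acc ++ [x]

-- folding the dedup step over the occurrences of a single letter ch in cs
theorem foldl_ddStep_filter (cs : List Char) (acc : List Char) (ch : Char) :
    ((cs.filter (fun x => ch == x)).foldl ddStep acc)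
      = if ch ∈ cs ∧ ch ∉ acc then acc ++ [ch] else acc := by
  induction cs generalizing acc with
  | nil => simp
  | cons x xs ih =>
    by_cases hx : ch = x
    · subst hx
      simp only [List.filter_cons, beq_self_eq_true, if_pos, List.foldl_cons, ddStep, ih]
      by_cases hm : ch ∈ acc
      · simp [hm]
      · simp [hm]
    · simp only [List.filter_cons, beq_iff_eq, hx, List.mem_cons]
      simpa using ih acc

theorem find_anton_spec' (c : String) : find_anton c = find_anton_alt c := by
  unfold find_anton find_anton_alt
  simp only []
  set cs := c.toList with hcs
  -- evaluate the outer loop over range(5): five inner collect loops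
  have hl :
      ((PySem.List.pyRange 0 (("anton".toList.length : Nat) : Int) 1).foldl (fun l i =>
        (PySem.List.pyRange 0 ((cs.length : Nat) : Int) 1).foldl (fun l j =>
          if PySem.List.pyGetD "anton".toList i ' ' == PySem.List.pyGetD cs j ' ' then
            l ++ [PySem.List.pyGetD cs j ' ']
          else l) l) ([] : List Char))
      = cs.filter (fun x => 'a' == x) ++ cs.filter (fun x => 'n' == x)
        ++ cs.filter (fun x => 't' == x) ++ cs.filter (fun x => 'o' == x)
        ++ cs.filter (fun x => 'n' == x) := by
    have inner : ∀ (ch : Char) (init : List Char),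
        ((PySem.List.pyRange 0 ((cs.length : Nat) : Int) 1).foldl (fun l j =>
          if ch == PySem.List.pyGetD cs j ' ' then l ++ [PySem.List.pyGetD cs j ' '] else l) init)
        = init ++ cs.filter (fun x => ch == x) := by
      intro ch init
      rw [PySem.List.foldl_pyRange_zero_pyGetD' cs ' '
            (fun l x => if ch == x then l ++ [x] else l) init]
      induction cs generalizing init with
      | nil => simp
      | cons x xs ih =>
        simp only [List.foldl_cons, List.filter_cons]
        by_cases h : (ch == x) = true
        · rw [if_pos h, if_pos h, ih]
          simp
        · rw [if_neg h, if_neg h, ih]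
    show ((PySem.List.pyRange 0 5 1).foldl _ _) = _
    rw [show PySem.List.pyRange 0 5 1 = [0, 1, 2, 3, 4] from by decide]
    simp only [List.foldl_cons, List.foldl_nil]
    rw [show (PySem.List.pyGetD "anton".toList 0 ' ') = 'a' from by decide] at *
    -- rewrite each of the five fixed letters and apply `inner` five times
    rw [inner 'a']
    rw [show (PySem.List.pyGetD "anton".toList 1 ' ') = 'n' from by decide, inner 'n']
    rw [show (PySem.List.pyGetD "anton".toList 2 ' ') = 't' from by decide, inner 't']
    rw [show (PySem.List.pyGetD "anton".toList 3 ' ') = 'o' from by decide, inner 'o']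
    rw [show (PySem.List.pyGetD "anton".toList 4 ' ') = 'n' from by decide, inner 'n']
    simp [List.append_assoc]
  rw [hl]
  -- evaluate the dedup loop as a fold of ddStep over l
  rw [PySem.List.foldl_pyRange_zero_pyGetD' _ ' '
        (fun anton x => if x ∈ anton then anton else anton ++ [x]) []]
  show String.mk ((_ : List Char).foldl ddStep [] ++ ['n']) = _
  congr 1
  rw [List.foldl_append, List.foldl_append, List.foldl_append, List.foldl_append]
  rw [foldl_ddStep_filter, foldl_ddStep_filter, foldl_ddStep_filter,
      foldl_ddStep_filter, foldl_ddStep_filter]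
  by_cases ha : 'a' ∈ cs <;> by_cases hn : 'n' ∈ cs <;>
    by_cases ht : 't' ∈ cs <;> by_cases ho : 'o' ∈ cs <;>
    simp [ha, hn, ht, ho]

-- ===== VERDICT (by name: the statement is the Claim_ definition above) =====
theorem find_anton_spec : Claim_equal_find_anton := by
  intro c _
  exact find_anton_spec' c
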